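-- pv_equiv track=rewrite | github.com/ph-zero/AutoHotKeyThings | AutoHotkeyGenerator.py | process_ahk_variables
-- ===== SOURCE A (Python) =====
-- def process_ahk_variables(text, is_v2):
--     # Replace our placeholder format with proper AHK variables
--     replacements = {
--         "{A_YYYY}": "{A_YYYY}" if is_v2 else "%A_YYYY%",
--         "{A_YY}": "{A_YY}" if is_v2 else "%A_YY%",
--         "{A_MM}": "{A_MM}" if is_v2 else "%A_MM%",
--         "{A_DD}": "{A_DD}" if is_v2 else "%A_DD%",
--         "{A_Hour}": "{A_Hour}" if is_v2 else "%A_Hour%",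
--         "{A_Min}": "{A_Min}" if is_v2 else "%A_Min%",
--         "{A_Sec}": "{A_Sec}" if is_v2 else "%A_Sec%",
--         "{A_MSec}": "{A_MSec}" if is_v2 else "%A_MSec%",
--         "{A_Now}": "{A_Now}" if is_v2 else "%A_Now%",
--         "{A_TickCount}": "{A_TickCount}" if is_v2 else "%A_TickCount%",
--         "{A_UserName}": "{A_UserName}" if is_v2 else "%A_UserName%",
--         "{A_ComputerName}": "{A_ComputerName}" if is_v2 else "%A_ComputerName%",
--         "{Clipboard}": "{A_Clipboard}" if is_v2 else "%Clipboard%",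
--         "{Enter}": "{Enter}" if is_v2 else "{Enter}",
--         "{Tab}": "{Tab}" if is_v2 else "{Tab}",
--         "{Space}": "{Space}" if is_v2 else "{Space}",
--         "{Backspace}": "{Backspace}" if is_v2 else "{Backspace}"
--     }
--
--     for placeholder, replacement in replacements.items():
--         text = text.replace(placeholder, replacement)
--
--     return text
-- ===== SOURCE B (Python) =====
-- _NAMES = ("A_YYYY", "A_YY", "A_MM", "A_DD", "A_Hour", "A_Min", "A_Sec",
--           "A_MSec", "A_Now", "A_TickCount", "A_UserName", "A_ComputerName",
--           "Clipboard", "Enter", "Tab", "Space", "Backspace")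
-- _KEYS = ("Enter", "Tab", "Space", "Backspace")
--
--
-- def process_ahk_variables(text, is_v2):
--     # One scan that parses "{name}" tokens and derives the replacement from
--     # the name and the version flag (no 17-pass replace cascade, no literal
--     # replacement table).
--     out = []
--     i = 0
--     n = len(text)
--     while i < n:
--         c = text[i]
--         if c == "{":
--             j = text.find("}", i + 1)
--             if j != -1:
--                 name = text[i + 1:j]
--                 if name in _NAMES:
--                     if is_v2:
--                         out.append("{A_Clipboard}" if name == "Clipboard"
--                                    else "{" + name + "}")
--                     else:
--                         out.append("{" + name + "}" if name in _KEYS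
--                                    else "%" + name + "%")
--                     i = j + 1
--                     continue
--         out.append(c)
--         i += 1
--     return "".join(out)
-- ===== Notes on version B (the rewrite author's own statement) =====
-- stated objective: alternative
-- what changed: Replaces the 17 sequential full-text str.replace passes over a literal placeholder->replacement table with a single left-to-right scan that parses '{name}' tokens (find the next '}') and derives the replacement from the name and the version flag.
import Mathlib
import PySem

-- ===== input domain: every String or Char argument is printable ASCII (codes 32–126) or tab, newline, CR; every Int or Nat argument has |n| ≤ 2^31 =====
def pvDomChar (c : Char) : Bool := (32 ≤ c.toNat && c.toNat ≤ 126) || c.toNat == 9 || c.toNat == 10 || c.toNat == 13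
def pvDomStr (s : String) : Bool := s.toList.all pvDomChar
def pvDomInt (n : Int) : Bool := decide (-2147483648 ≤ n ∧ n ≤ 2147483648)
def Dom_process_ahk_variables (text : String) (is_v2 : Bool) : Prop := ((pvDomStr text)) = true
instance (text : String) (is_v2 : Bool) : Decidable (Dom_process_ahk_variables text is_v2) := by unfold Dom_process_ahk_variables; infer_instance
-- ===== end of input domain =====

-- B replaces A's 17 sequential full-text replace passes over a literal table with one
-- left-to-right scan that parses "{name}" tokens and derives the replacement from the
-- name and the version flag (objective: alternative).

-- ===== PORT A =====
def process_ahk_variables (text : String) (is_v2 : Bool) : String :=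
  let replacements : PySem.Dict String String := PySem.Dict.ofList
    [ ("{A_YYYY}", if is_v2 then "{A_YYYY}" else "%A_YYYY%"),
      ("{A_YY}", if is_v2 then "{A_YY}" else "%A_YY%"),
      ("{A_MM}", if is_v2 then "{A_MM}" else "%A_MM%"),
      ("{A_DD}", if is_v2 then "{A_DD}" else "%A_DD%"),
      ("{A_Hour}", if is_v2 then "{A_Hour}" else "%A_Hour%"),
      ("{A_Min}", if is_v2 then "{A_Min}" else "%A_Min%"),
      ("{A_Sec}", if is_v2 then "{A_Sec}" else "%A_Sec%"),
      ("{A_MSec}", if is_v2 then "{A_MSec}" else "%A_MSec%"),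
      ("{A_Now}", if is_v2 then "{A_Now}" else "%A_Now%"),
      ("{A_TickCount}", if is_v2 then "{A_TickCount}" else "%A_TickCount%"),
      ("{A_UserName}", if is_v2 then "{A_UserName}" else "%A_UserName%"),
      ("{A_ComputerName}", if is_v2 then "{A_ComputerName}" else "%A_ComputerName%"),
      ("{Clipboard}", if is_v2 then "{A_Clipboard}" else "%Clipboard%"),
      ("{Enter}", if is_v2 then "{Enter}" else "{Enter}"),
      ("{Tab}", if is_v2 then "{Tab}" else "{Tab}"),
      ("{Space}", if is_v2 then "{Space}" else "{Space}"),
      ("{Backspace}", if is_v2 then "{Backspace}" else "{Backspace}") ]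
  replacements.items.foldl (fun t p => PySem.Str.replace t p.1 p.2) text

-- ===== PORT B =====
-- Source B's module-level _NAMES / _KEYS tuples, as lists of char lists
def pvNames : List (List Char) :=
  ["A_YYYY".toList, "A_YY".toList, "A_MM".toList, "A_DD".toList, "A_Hour".toList,
   "A_Min".toList, "A_Sec".toList, "A_MSec".toList, "A_Now".toList,
   "A_TickCount".toList, "A_UserName".toList, "A_ComputerName".toList,
   "Clipboard".toList, "Enter".toList, "Tab".toList, "Space".toList, "Backspace".toList]

def pvKeys : List (List Char) :=
  ["Enter".toList, "Tab".toList, "Space".toList, "Backspace".toList]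

-- Source B's replacement expression for a recognised name
def pvRepl (is_v2 : Bool) (name : List Char) : List Char :=
  if is_v2 then
    if name = "Clipboard".toList then "{A_Clipboard}".toList else '{' :: (name ++ ['}'])
  else
    if name ∈ pvKeys then '{' :: (name ++ ['}']) else '%' :: (name ++ ['%'])

-- Source B's `j = text.find("}", i+1); name = text[i+1:j]`: split the suffix after '{'
-- at the first '}' into (name, rest); none iff there is no '}'
def pvSplitClose : List Char → Option (List Char × List Char)
  | [] => none
  | c :: t => if c = '}' then some ([], t) else (pvSplitClose t).map (fun p => (c :: p.1, p.2))

-- Source B's `while i < n` loop; fuel = number of remaining characters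
def pvBraceGo (is_v2 : Bool) : Nat → List Char → List Char
  | _, [] => []
  | 0, _ :: _ => []
  | fuel+1, c :: t =>
    if c = '{' then
      match pvSplitClose t with
      | some (name, rest) =>
        if name ∈ pvNames then pvRepl is_v2 name ++ pvBraceGo is_v2 fuel rest
        else c :: pvBraceGo is_v2 fuel t
      | none => c :: pvBraceGo is_v2 fuel t
    else c :: pvBraceGo is_v2 fuel t

def process_ahk_variables_alt (text : String) (is_v2 : Bool) : String :=
  String.ofList (pvBraceGo is_v2 text.toList.length text.toList)

-- ===== PRECONDITION & SPEC =====
def Spec_process_ahk_variables (text : String) (is_v2 : Bool) (out : String) : Prop := out = process_ahk_variables_alt text is_v2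
instance (text : String) (is_v2 : Bool) (out : String) : Decidable (Spec_process_ahk_variables text is_v2 out) := by unfold Spec_process_ahk_variables; infer_instance

-- ===== CLAIM (what is proved, stated in full; the proofs are below) =====
def Claim_equal_process_ahk_variables : Prop := ∀ (text : String) (is_v2 : Bool), Dom_process_ahk_variables text is_v2 → Spec_process_ahk_variables text is_v2 (process_ahk_variables text is_v2)

-- ===== LEMMAS AND PROOFS =====

-- ---- a one-pass multi-replace scan (proof device relating both programs) ----

def pvFindMatch (ps : List (List Char × List Char)) (l : List Char) : Option (List Char × List Char) :=
  ps.find? (fun p => p.1.isPrefixOf l)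

def pvScanGo (ps : List (List Char × List Char)) : Nat → List Char → List Char
  | _, [] => []
  | 0, _ :: _ => []
  | fuel+1, c :: t =>
    match pvFindMatch ps (c :: t) with
    | some (k, v) => v ++ pvScanGo ps fuel ((c :: t).drop k.length)
    | none => c :: pvScanGo ps fuel t

-- Fuel-free view of the scan
def pvMs (ps : List (List Char × List Char)) (l : List Char) : List Char :=
  pvScanGo ps l.length l

-- the key "{name}" and the table B's scan is equivalent to
def pvKeyOf (n : List Char) : List Char := '{' :: (n ++ ['}'])

def psOf (is_v2 : Bool) : List (List Char × List Char) :=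
  pvNames.map (fun n => (pvKeyOf n, pvRepl is_v2 n))

-- "no compatibility": neither word is a prefix of the other
def pvNC (a b : List Char) : Bool := !(a.isPrefixOf b || b.isPrefixOf a)

-- Boolean conditions letting one more replace pass (key k, value v) commute with a prior scan by ps
def pvTailB (ps : List (List Char × List Char)) (k v : List Char) : Bool :=
  (!k.isEmpty) && ps.all (fun p =>
    (List.range p.2.length).all (fun j => pvNC k (p.2.drop j)) &&
    (List.range k.length).all (fun j => decide (j = 0) || (pvNC p.1 (k.drop j) && pvNC p.2 (k.drop j))))

def pvGoodAux : List (List Char × List Char) → Bool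
  | [] => true
  | p :: rest => pvTailB rest.reverse p.1 p.2 && pvGoodAux rest

def pvGood (ps : List (List Char × List Char)) : Prop := pvGoodAux ps.reverse = true

theorem pv_prefix_split {w v x : List Char} (h : w <+: v ++ x) : w <+: v ∨ v <+: w := by
  rcases le_or_gt w.length v.length with hle | hgt
  · exact Or.inl (List.prefix_of_prefix_length_le h (v.prefix_append x) hle)
  · exact Or.inr (List.prefix_of_prefix_length_le (v.prefix_append x) h (le_of_lt hgt))

theorem pvNC_spec {a b : List Char} (h : pvNC a b = true) : ¬ a <+: b ∧ ¬ b <+: a := by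
  simp only [pvNC, Bool.not_eq_eq_eq_not, Bool.not_true, Bool.or_eq_false_iff] at h
  constructor
  · intro hp; have := List.isPrefixOf_iff_prefix.mpr hp; rw [h.1] at this; exact Bool.false_ne_true this
  · intro hp; have := List.isPrefixOf_iff_prefix.mpr hp; rw [h.2] at this; exact Bool.false_ne_true this

theorem pvNC_not_prefix_append {a b x : List Char} (h : pvNC a b = true) : ¬ a <+: b ++ x := by
  intro hp
  rcases pv_prefix_split hp with h1 | h1
  · exact (pvNC_spec h).1 h1
  · exact (pvNC_spec h).2 h1

theorem pvTailB_spec {ps : List (List Char × List Char)} {k v : List Char}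
    (h : pvTailB ps k v = true) :
    k ≠ [] ∧ ∀ p ∈ ps,
      (∀ j, j < p.2.length → pvNC k (p.2.drop j) = true) ∧
      (∀ j, 0 < j → j < k.length → pvNC p.1 (k.drop j) = true ∧ pvNC p.2 (k.drop j) = true) := by
  simp only [pvTailB, Bool.and_eq_true, List.all_eq_true, List.mem_range,
    Bool.not_eq_eq_eq_not, Bool.or_eq_true, decide_eq_true_eq] at h
  obtain ⟨hk, hall⟩ := h
  refine ⟨by simpa [List.isEmpty_iff] using hk, ?_⟩
  intro p hp
  obtain ⟨h1, h2⟩ := hall p hp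
  refine ⟨fun j hj => h1 j hj, fun j hj0 hjk => ?_⟩
  rcases h2 j hjk with h | h
  · omega
  · exact h

theorem pvScanGo_fuel (ps : List (List Char × List Char)) (hne : ∀ p ∈ ps, p.1 ≠ []) :
    ∀ n fuel (l : List Char), l.length = n → n ≤ fuel → pvScanGo ps fuel l = pvMs ps l := by
  intro n
  induction n using Nat.strong_induction_on with
  | _ n ih =>
    intro fuel l hlen hfuel
    match l, fuel with
    | [], fuel => cases fuel <;> rfl
    | c :: t, 0 => simp at hlen; omega
    | c :: t, fuel+1 =>
      simp only [pvMs, List.length_cons, pvScanGo]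
      cases hm : pvFindMatch ps (c :: t) with
      | none =>
        have h1 : t.length < n := by simp at hlen; omega
        dsimp only
        rw [ih t.length h1 fuel t rfl (by omega), ih t.length h1 t.length t rfl le_rfl]
      | some kv =>
        obtain ⟨k, v⟩ := kv
        have hk : (k, v) ∈ ps := List.mem_of_find?_eq_some hm
        have hk1 : 1 ≤ k.length := by
          have := hne _ hk; cases k with
          | nil => simp at this
          | cons a b => simp
        have hlt : ((c :: t).drop k.length).length < n := by simp at hlen ⊢; omega
        dsimp only
        rw [ih _ hlt fuel _ rfl (by simp at hlen ⊢; omega),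
            ih _ hlt t.length _ rfl (by simp; omega)]

theorem pvMs_cons_none {ps : List (List Char × List Char)} {c : Char} {t : List Char}
    (hm : pvFindMatch ps (c :: t) = none) : pvMs ps (c :: t) = c :: pvMs ps t := by
  simp [pvMs, pvScanGo, hm]

theorem pvMs_cons_some {ps : List (List Char × List Char)} (hne : ∀ p ∈ ps, p.1 ≠ [])
    {c : Char} {t k v : List Char} (hm : pvFindMatch ps (c :: t) = some (k, v)) :
    pvMs ps (c :: t) = v ++ pvMs ps ((c :: t).drop k.length) := by
  have hk : (k, v) ∈ ps := List.mem_of_find?_eq_some hm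
  have hk1 : 1 ≤ k.length := by
    have := hne _ hk; cases k with
    | nil => simp at this
    | cons a b => simp
  simp only [pvMs, List.length_cons, pvScanGo, hm]
  rw [pvScanGo_fuel ps hne ((c :: t).drop k.length).length t.length _ rfl (by simp; omega)]
  rfl

theorem pvMs_empty_ps : ∀ l : List Char, pvMs [] l = l := by
  intro l
  induction l with
  | nil => rfl
  | cons c t ih =>
    rw [pvMs_cons_none (by simp [pvFindMatch])]
    rw [ih]

theorem pvMs_append_untouched {ps : List (List Char × List Char)} (hne : ∀ p ∈ ps, p.1 ≠ []) :
    ∀ (p r : List Char), (∀ j, j < p.length → ∀ q ∈ ps, ¬ (q.1 <+: (p.drop j ++ r))) →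
      pvMs ps (p ++ r) = p ++ pvMs ps r := by
  intro p
  induction p with
  | nil => intro r _; simp
  | cons c p' ih =>
    intro r H
    have hm : pvFindMatch ps (c :: (p' ++ r)) = none := by
      apply List.find?_eq_none.mpr
      intro q hq hpre
      exact H 0 (Nat.succ_pos _) q hq (by simpa [List.isPrefixOf_iff_prefix] using hpre)
    have heq : pvMs ps ((c :: p') ++ r) = c :: pvMs ps (p' ++ r) := pvMs_cons_none hm
    rw [List.cons_append] at heq ⊢
    rw [heq, ih r (fun j hj q hq => H (j+1) (by simpa using Nat.succ_lt_succ hj) q hq)]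
    rfl

theorem pv_no_prefix_ms {ps : List (List Char × List Char)} {k : List Char}
    (hne : ∀ p ∈ ps, p.1 ≠ [])
    (hD : ∀ p ∈ ps, ∀ j, 0 < j → j < k.length → pvNC p.2 (k.drop j) = true) :
    ∀ n (t : List Char) j, t.length = n → 0 < j → j ≤ k.length →
      ¬ (k.drop j <+: t) → ¬ (k.drop j <+: pvMs ps t) := by
  intro n
  induction n using Nat.strong_induction_on with
  | _ n ih =>
    intro t j hlen hj hjk hnt
    by_cases hde : k.drop j = []
    · exact absurd (hde ▸ List.nil_prefix) hnt
    have hjlt : j < k.length := by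
      rcases Nat.lt_or_ge j k.length with h | h
      · exact h
      · exact absurd (List.drop_eq_nil_of_le h) hde
    match t with
    | [] =>
      rw [pvMs]
      intro hp
      exact hde (List.prefix_nil.mp hp)
    | c :: t' =>
      cases hm : pvFindMatch ps (c :: t') with
      | some qv =>
        obtain ⟨q1, q2⟩ := qv
        have hq : (q1, q2) ∈ ps := List.mem_of_find?_eq_some hm
        rw [pvMs_cons_some hne hm]
        intro hp
        rcases pv_prefix_split hp with h1 | h1
        · exact (pvNC_spec (hD _ hq j hj hjlt)).2 h1
        · exact (pvNC_spec (hD _ hq j hj hjlt)).1 h1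
      | none =>
        rw [pvMs_cons_none hm]
        intro hp
        have hkj : k.drop j = k[j] :: k.drop (j+1) := List.drop_eq_getElem_cons hjlt
        rw [hkj, List.cons_prefix_cons] at hp
        obtain ⟨hc, hp2⟩ := hp
        have hnt2 : ¬ (k.drop (j+1) <+: t') := by
          intro h
          exact hnt (by rw [hkj, hc]; exact (List.cons_prefix_cons).mpr ⟨rfl, h⟩)
        exact ih t'.length (by simp at hlen; omega) t' (j+1) rfl (by omega) (by omega) hnt2 hp2

theorem pvMs_compose (ps : List (List Char × List Char)) (k v : List Char)
    (hk : k ≠ []) (hne : ∀ p ∈ ps, p.1 ≠ [])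
    (hA : ∀ p ∈ ps, ∀ j, j < p.2.length → pvNC k (p.2.drop j) = true)
    (hB : ∀ p ∈ ps, ∀ j, 0 < j → j < k.length → pvNC p.1 (k.drop j) = true ∧ pvNC p.2 (k.drop j) = true) :
    ∀ n (s : List Char), s.length = n → pvMs [(k, v)] (pvMs ps s) = pvMs (ps ++ [(k, v)]) s := by
  have hne1 : ∀ p ∈ [(k, v)], (p : List Char × List Char).1 ≠ [] := by simp [hk]
  have hne2 : ∀ p ∈ ps ++ [(k, v)], (p : List Char × List Char).1 ≠ [] := by
    intro p hp
    rcases List.mem_append.mp hp with h | h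
    · exact hne p h
    · simp at h; rw [h]; exact hk
  intro n
  induction n using Nat.strong_induction_on with
  | _ n ih =>
    intro s hlen
    match s with
    | [] => rfl
    | c :: t =>
      cases hm : pvFindMatch ps (c :: t) with
      | some qv =>
        obtain ⟨q1, q2⟩ := qv
        have hq : (q1, q2) ∈ ps := List.mem_of_find?_eq_some hm
        have hq1 : q1 ≠ [] := hne _ hq
        have hpre : q1 <+: (c :: t) := by
          have := List.find?_some hm
          simpa [List.isPrefixOf_iff_prefix] using this
        obtain ⟨r, hr⟩ := hpre
        have hdrop : (c :: t).drop q1.length = r := by rw [← hr]; simp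
        have hm2 : pvFindMatch (ps ++ [(k, v)]) (c :: t) = some (q1, q2) := by
          unfold pvFindMatch at hm ⊢
          rw [List.find?_append, hm]; rfl
        rw [pvMs_cons_some hne hm, pvMs_cons_some hne2 hm2, hdrop]
        have hunt : pvMs [(k, v)] (q2 ++ pvMs ps r) = q2 ++ pvMs [(k, v)] (pvMs ps r) := by
          apply pvMs_append_untouched hne1
          intro j hj q hqm
          simp only [List.mem_singleton] at hqm
          rw [hqm]
          exact pvNC_not_prefix_append (hA _ hq j hj)
        rw [hunt]
        have hlen2 : q1.length + r.length = t.length + 1 := by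
          simpa using congrArg List.length hr
        have h1 : 1 ≤ q1.length := by
          cases q1 with
          | nil => simp at hq1
          | cons a b => simp
        have hrlen : r.length < n := by simp at hlen; omega
        rw [ih r.length hrlen r rfl]
      | none =>
        have hnone : ∀ q ∈ ps, ¬ (q.1 <+: (c :: t)) := by
          intro q hq
          have := List.find?_eq_none.mp hm q hq
          simpa [List.isPrefixOf_iff_prefix] using this
        obtain ⟨kc, kt, rfl⟩ : ∃ a l, k = a :: l := by
          cases k with
          | nil => simp at hk
          | cons a l => exact ⟨a, l, rfl⟩
        by_cases hkp : (kc :: kt) <+: (c :: t)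
        · obtain ⟨r, hr⟩ := hkp
          have hdrop : (c :: t).drop (kc :: kt).length = r := by rw [← hr]; simp
          have huntK : pvMs ps ((kc :: kt) ++ r) = (kc :: kt) ++ pvMs ps r := by
            apply pvMs_append_untouched hne
            intro j hj q hq
            rcases Nat.eq_zero_or_pos j with hj0 | hjp
            · rw [hj0, List.drop_zero, hr]
              exact hnone q hq
            · exact pvNC_not_prefix_append ((hB q hq j hjp hj).1)
          have hm2 : pvFindMatch (ps ++ [(kc :: kt, v)]) (c :: t) = some (kc :: kt, v) := by
            unfold pvFindMatch at hm ⊢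
            rw [List.find?_append, hm]
            simp only [Option.none_or]
            exact List.find?_cons_of_pos (by simp only [List.isPrefixOf_iff_prefix]; exact ⟨r, hr⟩)
          rw [pvMs_cons_some hne2 hm2, hdrop, ← hr, huntK]
          have hmk : pvFindMatch [(kc :: kt, v)] ((kc :: kt) ++ pvMs ps r) = some (kc :: kt, v) := by
            unfold pvFindMatch
            simp [List.isPrefixOf_iff_prefix]
          rw [List.cons_append]
          rw [pvMs_cons_some hne1 (by rw [← List.cons_append]; exact hmk)]
          rw [← List.cons_append, List.drop_left]
          have hlen2 := congrArg List.length hr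
          simp at hlen2 hlen
          have hrlen : r.length < n := by omega
          rw [ih r.length hrlen r rfl]
        · have hm2 : pvFindMatch (ps ++ [(kc :: kt, v)]) (c :: t) = none := by
            unfold pvFindMatch at hm ⊢
            rw [List.find?_append, hm]
            simp only [Option.none_or]
            exact (List.find?_cons_of_neg (by simpa [List.isPrefixOf_iff_prefix] using hkp)).trans rfl
          rw [pvMs_cons_none hm, pvMs_cons_none hm2]
          have hknp : ¬ ((kc :: kt) <+: c :: pvMs ps t) := by
            intro hp
            rw [List.cons_prefix_cons] at hp
            obtain ⟨hc, hp2⟩ := hp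
            have hnt : ¬ (kt <+: t) := by
              intro h
              exact hkp ((List.cons_prefix_cons).mpr ⟨hc, h⟩)
            have hkt : (kc :: kt).drop 1 = kt := by simp
            have := pv_no_prefix_ms hne
              (fun p hp j hj hjk => (hB p hp j hj hjk).2)
              t.length t 1 rfl (by omega) (by simp)
              (by rw [hkt]; exact hnt)
            rw [hkt] at this
            exact this hp2
          have hmK : pvFindMatch [(kc :: kt, v)] (c :: pvMs ps t) = none := by
            unfold pvFindMatch
            exact (List.find?_cons_of_neg (by simpa [List.isPrefixOf_iff_prefix] using hknp)).trans rfl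
          rw [pvMs_cons_none hmK]
          have htlen : t.length < n := by simp at hlen; omega
          rw [ih t.length htlen t rfl]

-- A's chain of replace passes, on the character level
def pvChain (ps : List (List Char × List Char)) (s : List Char) : List Char :=
  ps.foldl (fun t p => PySem.Chars.replace t p.1 p.2) s

theorem pv_replace_go_spec (old new : List Char) (ho : old ≠ []) :
    ∀ fuel (l acc : List Char), l.length ≤ fuel →
      PySem.Chars.replace.go old new fuel l acc = acc.reverse ++ pvMs [(old, new)] l := by
  have hne1 : ∀ p ∈ [(old, new)], (p : List Char × List Char).1 ≠ [] := by simp [ho]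
  intro fuel
  induction fuel with
  | zero =>
    intro l acc hl
    have hl0 : l = [] := List.length_eq_zero_iff.mp (by omega)
    subst hl0
    rw [PySem.Chars.replace.go]
    rfl
  | succ fuel ih =>
    intro l acc hl
    match l with
    | [] =>
      rw [PySem.Chars.replace.go]
      · have hms : pvMs [(old, new)] ([] : List Char) = [] := rfl
        rw [hms, List.append_nil]
      · omega
    | c :: t =>
      conv_lhs => rw [PySem.Chars.replace.go]
      by_cases hp : old.isPrefixOf (c :: t)
      · rw [if_pos hp]
        have hmk : pvFindMatch [(old, new)] (c :: t) = some (old, new) := by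
          unfold pvFindMatch; simp [hp]
        rw [pvMs_cons_some hne1 hmk]
        have h1 : 1 ≤ old.length := by
          cases old with
          | nil => simp at ho
          | cons a b => simp
        rw [ih _ _ (by simp at hl ⊢; omega)]
        simp
      · rw [if_neg hp]
        have hmk : pvFindMatch [(old, new)] (c :: t) = none := by
          unfold pvFindMatch; simp [hp]
        rw [pvMs_cons_none hmk]
        rw [ih _ _ (by simp at hl; omega)]
        simp

theorem pv_replace_eq (l old new : List Char) (ho : old ≠ []) :
    PySem.Chars.replace l old new = pvMs [(old, new)] l := by
  unfold PySem.Chars.replace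
  rw [if_neg (by simpa [List.isEmpty_iff] using ho)]
  rw [pv_replace_go_spec old new ho l.length l [] le_rfl]
  simp

theorem pvGood_append {ps : List (List Char × List Char)} {p : List Char × List Char}
    (h : pvGood (ps ++ [p])) : pvGood ps ∧ pvTailB ps p.1 p.2 = true := by
  unfold pvGood at h
  rw [List.reverse_append] at h
  simp only [List.reverse_singleton, List.singleton_append, pvGoodAux, Bool.and_eq_true,
    List.reverse_reverse] at h
  exact ⟨h.2, h.1⟩

theorem pvGood_nonempty : ∀ ps : List (List Char × List Char), pvGood ps →
    ∀ p ∈ ps, p.1 ≠ [] := by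
  intro ps
  induction ps using List.reverseRecOn with
  | nil => intro _ p hp; simp at hp
  | append_singleton ps q ih =>
    intro hg p hp
    obtain ⟨hg2, htail⟩ := pvGood_append hg
    rcases List.mem_append.mp hp with h | h
    · exact ih hg2 p h
    · simp at h
      rw [h]
      exact (pvTailB_spec htail).1

theorem pv_chain_eq_ms : ∀ ps : List (List Char × List Char), pvGood ps →
    ∀ s : List Char, pvChain ps s = pvMs ps s := by
  intro ps
  induction ps using List.reverseRecOn with
  | nil =>
    intro _ s
    rw [pvChain, List.foldl_nil, pvMs_empty_ps]
  | append_singleton ps p ih =>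
    intro hg s
    obtain ⟨hg2, htail⟩ := pvGood_append hg
    obtain ⟨hk, hrest⟩ := pvTailB_spec htail
    have hchain : pvChain (ps ++ [p]) s = PySem.Chars.replace (pvChain ps s) p.1 p.2 := by
      rw [pvChain, List.foldl_append, List.foldl_cons, List.foldl_nil]; rfl
    rw [hchain, ih hg2, pv_replace_eq _ _ _ hk]
    obtain ⟨p1, p2⟩ := p
    exact pvMs_compose ps p1 p2 hk (pvGood_nonempty ps hg2)
      (fun q hq j hj => (hrest q hq).1 j hj)
      (fun q hq j hj hjk => (hrest q hq).2 j hj hjk)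
      s.length s rfl

theorem pv_str_chain (L : List (String × String)) :
    ∀ s : String, (L.foldl (fun t p => PySem.Str.replace t p.1 p.2) s).toList
      = pvChain (L.map (fun p => (p.1.toList, p.2.toList))) s.toList := by
  induction L with
  | nil => intro s; simp [pvChain]
  | cons p L ih =>
    intro s
    rw [List.foldl_cons, ih]
    simp only [List.map_cons, pvChain, List.foldl_cons]
    congr 1
    simp [PySem.Str.replace]

theorem pv_toList_inj {s t : String} (h : s.toList = t.toList) : s = t := by
  have := congrArg String.ofList h
  simpa using this

-- ---- relating B's brace scan to the one-pass multi-replace scan ----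

theorem pvSplitClose_some : ∀ {t n r : List Char}, pvSplitClose t = some (n, r) →
    t = n ++ '}' :: r ∧ '}' ∉ n := by
  intro t
  induction t with
  | nil => intro n r h; simp [pvSplitClose] at h
  | cons c t' ih =>
    intro n r h
    by_cases hc : c = '}'
    · subst hc
      simp [pvSplitClose] at h
      obtain ⟨h1, h2⟩ := h
      subst h1; subst h2
      simp
    · simp [pvSplitClose, hc] at h
      obtain ⟨n', hsp, hn⟩ := h
      obtain ⟨ht, hmem⟩ := ih hsp
      subst hn
      refine ⟨by rw [ht]; rfl, ?_⟩
      intro hx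
      rcases List.mem_cons.mp hx with h1 | h1
      · exact hc h1.symm
      · exact hmem h1

theorem pvSplitClose_none : ∀ {t : List Char}, pvSplitClose t = none → '}' ∉ t := by
  intro t
  induction t with
  | nil => intro _; simp
  | cons c t' ih =>
    intro h
    by_cases hc : c = '}'
    · subst hc; simp [pvSplitClose] at h
    · simp [pvSplitClose, hc] at h
      intro hx
      rcases List.mem_cons.mp hx with h1 | h1
      · exact hc h1.symm
      · exact ih h h1

theorem pv_uniq : ∀ (n : List Char), ∀ {m x y : List Char}, '}' ∉ n → '}' ∉ m →
    n ++ '}' :: x = m ++ '}' :: y → n = m := by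
  intro n
  induction n with
  | nil =>
    intro m x y _ hm h
    cases m with
    | nil => rfl
    | cons b m' =>
      simp at h
      obtain ⟨hb, _⟩ := h
      exact absurd (by rw [hb]; exact List.mem_cons_self) hm
  | cons a n' ih =>
    intro m x y hn hm h
    cases m with
    | nil =>
      simp at h
      obtain ⟨hb, _⟩ := h
      exact absurd (by rw [hb]; exact List.mem_cons_self) hn
    | cons b m' =>
      simp at h
      obtain ⟨hab, h2⟩ := h
      have := ih (fun hx => hn (List.mem_cons_of_mem _ hx)) (fun hx => hm (List.mem_cons_of_mem _ hx)) h2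
      rw [hab, this]

theorem pv_find?_decide_eq {α : Type} [DecidableEq α] (a : α) :
    ∀ (L : List α) (p : α → Bool), (∀ x ∈ L, p x = decide (x = a)) →
      L.find? p = if a ∈ L then some a else none := by
  intro L
  induction L with
  | nil => intro p _; simp
  | cons x L ih =>
    intro p hp
    by_cases hx : x = a
    · subst hx
      rw [List.find?_cons_of_pos (by rw [hp x List.mem_cons_self]; simp)]
      simp
    · rw [List.find?_cons_of_neg (by rw [hp x List.mem_cons_self]; simp [hx])]
      rw [ih p (fun y hy => hp y (List.mem_cons_of_mem _ hy))]
      have hax : ¬ a = x := fun h => hx h.symm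
      simp [hax]

theorem pv_names_no_close : ∀ n ∈ pvNames, '}' ∉ n := by decide

theorem pvFindMatch_psOf (is_v2 : Bool) (l : List Char) :
    pvFindMatch (psOf is_v2) l =
      (match l with
       | [] => none
       | c :: t =>
         if c = '{' then
           match pvSplitClose t with
           | some (name, _) =>
             if name ∈ pvNames then some (pvKeyOf name, pvRepl is_v2 name) else none
           | none => none
         else none) := by
  unfold pvFindMatch psOf
  rw [List.find?_map]
  cases l with
  | nil =>
    rw [List.find?_eq_none.mpr]
    · rfl
    · intro n _
      show ¬ (pvKeyOf n).isPrefixOf [] = true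
      rw [List.isPrefixOf_iff_prefix]
      intro hp
      exact absurd (List.prefix_nil.mp hp) (by simp [pvKeyOf])
  | cons c t =>
    by_cases hc : c = '{'
    · subst hc
      cases hs : pvSplitClose t with
      | some nr =>
        obtain ⟨n₀, r⟩ := nr
        obtain ⟨ht, hn₀⟩ := pvSplitClose_some hs
        have hpred : ∀ n ∈ pvNames,
            (((fun p => p.1.isPrefixOf ('{' :: t)) ∘ fun n => (pvKeyOf n, pvRepl is_v2 n)) n)
              = decide (n = n₀) := by
          intro n hn
          show (pvKeyOf n).isPrefixOf ('{' :: t) = decide (n = n₀)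
          by_cases he : n = n₀
          · subst he
            have hpre : pvKeyOf n <+: ('{' :: t) := by
              rw [ht, pvKeyOf, List.cons_prefix_cons]
              exact ⟨rfl, ⟨r, by simp⟩⟩
            simp [List.isPrefixOf_iff_prefix, hpre]
          · have hnp : ¬ (pvKeyOf n <+: ('{' :: t)) := by
              intro hp
              rw [pvKeyOf, List.cons_prefix_cons] at hp
              obtain ⟨-, hp2⟩ := hp
              rw [ht] at hp2
              obtain ⟨s, hss⟩ := hp2
              rw [List.append_assoc] at hss
              have : n ++ '}' :: s = n₀ ++ '}' :: r := by simpa using hss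
              exact he (pv_uniq n (pv_names_no_close n hn) hn₀ this)
            rw [decide_eq_false he, Bool.eq_false_iff]
            intro hpt
            exact hnp (List.isPrefixOf_iff_prefix.mp hpt)
        rw [pv_find?_decide_eq n₀ pvNames _ hpred]
        by_cases hm : n₀ ∈ pvNames <;> simp [hm, hs]
      | none =>
        have hnt := pvSplitClose_none hs
        rw [List.find?_eq_none.mpr]
        · simp [hs]
        · intro n _
          show ¬ (pvKeyOf n).isPrefixOf ('{' :: t) = true
          rw [List.isPrefixOf_iff_prefix]
          intro hp
          rw [pvKeyOf, List.cons_prefix_cons] at hp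
          exact hnt (hp.2.subset (by simp))
    · rw [List.find?_eq_none.mpr]
      · simp [hc]
      · intro n _
        show ¬ (pvKeyOf n).isPrefixOf (c :: t) = true
        rw [List.isPrefixOf_iff_prefix]
        intro hp
        rw [pvKeyOf, List.cons_prefix_cons] at hp
        exact hc hp.1.symm

theorem pvBraceGo_eq_scan (is_v2 : Bool) :
    ∀ fuel (l : List Char), pvBraceGo is_v2 fuel l = pvScanGo (psOf is_v2) fuel l := by
  intro fuel
  induction fuel with
  | zero => intro l; cases l <;> rfl
  | succ fuel ih =>
    intro l
    cases l with
    | nil => rfl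
    | cons c t =>
      rw [pvScanGo, pvFindMatch_psOf]
      by_cases hc : c = '{'
      · subst hc
        cases hs : pvSplitClose t with
        | some nr =>
          obtain ⟨n₀, r⟩ := nr
          obtain ⟨ht, -⟩ := pvSplitClose_some hs
          by_cases hm : n₀ ∈ pvNames
          · have ht2 : t = (n₀ ++ ['}']) ++ r := by rw [ht]; simp
            have hdrop : List.drop (pvKeyOf n₀).length ('{' :: t) = r := by
              rw [pvKeyOf, List.length_cons, List.drop_succ_cons, ht2]
              simpa using List.drop_left (l₁ := n₀ ++ ['}']) (l₂ := r)
            simp [pvBraceGo, hs, hm, hdrop, ih]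
          · simp [pvBraceGo, hs, hm, ih]
        | none => simp [pvBraceGo, hs, ih]
      · simp [pvBraceGo, hc, ih]

-- the string table of port A, mapped to char level, is exactly psOf
theorem pv_tbl (is_v2 : Bool) :
    ((PySem.Dict.ofList
      [ ("{A_YYYY}", if is_v2 then "{A_YYYY}" else "%A_YYYY%"),
        ("{A_YY}", if is_v2 then "{A_YY}" else "%A_YY%"),
        ("{A_MM}", if is_v2 then "{A_MM}" else "%A_MM%"),
        ("{A_DD}", if is_v2 then "{A_DD}" else "%A_DD%"),
        ("{A_Hour}", if is_v2 then "{A_Hour}" else "%A_Hour%"),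
        ("{A_Min}", if is_v2 then "{A_Min}" else "%A_Min%"),
        ("{A_Sec}", if is_v2 then "{A_Sec}" else "%A_Sec%"),
        ("{A_MSec}", if is_v2 then "{A_MSec}" else "%A_MSec%"),
        ("{A_Now}", if is_v2 then "{A_Now}" else "%A_Now%"),
        ("{A_TickCount}", if is_v2 then "{A_TickCount}" else "%A_TickCount%"),
        ("{A_UserName}", if is_v2 then "{A_UserName}" else "%A_UserName%"),
        ("{A_ComputerName}", if is_v2 then "{A_ComputerName}" else "%A_ComputerName%"),
        ("{Clipboard}", if is_v2 then "{A_Clipboard}" else "%Clipboard%"),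
        ("{Enter}", if is_v2 then "{Enter}" else "{Enter}"),
        ("{Tab}", if is_v2 then "{Tab}" else "{Tab}"),
        ("{Space}", if is_v2 then "{Space}" else "{Space}"),
        ("{Backspace}", if is_v2 then "{Backspace}" else "{Backspace}") ]
      : PySem.Dict String String).items.map (fun p => (p.1.toList, p.2.toList)))
      = psOf is_v2 := by
  cases is_v2 <;> decide

theorem pvGood_psOf (is_v2 : Bool) : pvGood (psOf is_v2) := by
  cases is_v2 <;> (unfold pvGood; decide)

-- ===== VERDICT (by name: the statement is the Claim_ definition above) =====
set_option maxRecDepth 40000 in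
theorem process_ahk_variables_spec : Claim_equal_process_ahk_variables := by
  intro text is_v2 _
  unfold Spec_process_ahk_variables
  apply pv_toList_inj
  unfold process_ahk_variables process_ahk_variables_alt
  rw [pv_str_chain, pv_tbl, pv_chain_eq_ms _ (pvGood_psOf is_v2), pvBraceGo_eq_scan]
  simp [pvMs]
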